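-- pv_equiv track=rewrite | github.com/ww2d2vjh8c-lab/cognithor | src/jarvis/arc/classic/dsl.py | get_largest_object
-- ===== SOURCE A (Python) =====
-- Grid = list[list[int]]
--
-- def _flood_fill(
--     grid: Grid,
--     visited: list[list[bool]],
--     r: int,
--     c: int,
--     color: int,
-- ) -> list[tuple[int, int]]:
--     """Iterative flood-fill returning all (r, c) cells in the component."""
--     rows = len(grid)
--     cols = len(grid[0]) if rows else 0
--     stack = [(r, c)]
--     component: list[tuple[int, int]] = []
--     while stack:
--         cr, cc = stack.pop()
--         if cr < 0 or cr >= rows or cc < 0 or cc >= cols: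
--             continue
--         if visited[cr][cc]:
--             continue
--         if grid[cr][cc] != color:
--             continue
--         visited[cr][cc] = True
--         component.append((cr, cc))
--         stack.extend([(cr + 1, cc), (cr - 1, cc), (cr, cc + 1), (cr, cc - 1)])
--     return component
--
-- def get_objects(grid: Grid, background: int = 0) -> list[Grid]:
--     """Return connected components (4-connected) as separate grids.
--
--     Each returned grid is the same size as the input, with only the
--     cells of that component filled in (background elsewhere).
--     """
--     rows = len(grid)
--     cols = len(grid[0]) if rows else 0
--     visited = [[False] * cols for _ in range(rows)]
--     objects: list[Grid] = []
--
--     for r in range(rows):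
--         for c in range(cols):
--             cell = grid[r][c]
--             if cell != background and not visited[r][c]:
--                 component = _flood_fill(grid, visited, r, c, cell)
--                 obj: Grid = [[background] * cols for _ in range(rows)]
--                 for cr, cc in component:
--                     obj[cr][cc] = grid[cr][cc]
--                 objects.append(obj)
--
--     return objects
--
-- def get_largest_object(grid: Grid, background: int = 0) -> Grid:
--     """Return the largest connected component as a grid."""
--     objects = get_objects(grid, background)
--     if not objects:
--         return grid
--     rows = len(grid)
--     cols = len(grid[0]) if rows else 0
--
--     def _size(obj: Grid) -> int:
--         return sum(1 for r in range(rows) for c in range(cols) if obj[r][c] != background)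
--
--     return max(objects, key=_size)
-- ===== SOURCE B (Python) =====
-- def get_largest_object(grid, background=0):
--     """Collect components as cell lists (one flood-fill scan over a seen-set),
--     pick the first longest, and render the output grid in a single comprehension."""
--     rows = len(grid)
--     cols = len(grid[0]) if rows else 0
--     seen = set()
--     comps = []
--     for r in range(rows):
--         for c in range(cols):
--             if grid[r][c] != background and (r, c) not in seen:
--                 color = grid[r][c]
--                 comp = []
--                 stack = [(r, c)]
--                 while stack:
--                     cr, cc = stack.pop()
--                     if 0 <= cr < rows and 0 <= cc < cols \
--                             and (cr, cc) not in seen and grid[cr][cc] == color: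
--                         seen.add((cr, cc))
--                         comp.append((cr, cc))
--                         stack.extend([(cr + 1, cc), (cr - 1, cc), (cr, cc + 1), (cr, cc - 1)])
--                 comps.append(comp)
--     if not comps:
--         return grid
--     best = comps[0]
--     for comp in comps[1:]:
--         if len(comp) > len(best):
--             best = comp
--     bset = set(best)
--     return [[grid[r][c] if (r, c) in bset else background for c in range(cols)]
--             for r in range(rows)]
-- ===== Notes on version B (the rewrite author's own statement) =====
-- stated objective: faster
-- what changed: A builds one full rows*cols grid per component and re-counts every grid cell-by-cell inside max(key=_size); B keeps components as cell lists in a seen-set flood-fill scan, picks the first longest list by length, and renders the single output grid in one comprehension over a membership set.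
import Mathlib
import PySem

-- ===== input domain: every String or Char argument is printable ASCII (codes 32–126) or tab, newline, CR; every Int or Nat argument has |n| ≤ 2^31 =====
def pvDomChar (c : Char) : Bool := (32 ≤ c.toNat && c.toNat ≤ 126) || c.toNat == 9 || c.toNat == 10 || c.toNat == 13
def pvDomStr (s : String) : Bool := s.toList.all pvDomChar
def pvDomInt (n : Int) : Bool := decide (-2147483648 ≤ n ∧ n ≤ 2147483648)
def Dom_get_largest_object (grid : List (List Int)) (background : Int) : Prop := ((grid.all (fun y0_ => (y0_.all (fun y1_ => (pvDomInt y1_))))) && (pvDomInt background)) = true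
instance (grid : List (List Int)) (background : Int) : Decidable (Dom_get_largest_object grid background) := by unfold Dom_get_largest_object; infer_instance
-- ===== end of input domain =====

-- B replaces A's build-a-grid-per-component-then-recount-and-max pipeline by a seen-set
-- flood-fill scan keeping components as cell lists, a first-longest pick by length, and a
-- single rendering comprehension over a membership set (objective: faster).

-- ===== PORT A =====
-- Index primitives for A's matrices: A indexes grid/visited only after checking
-- 0 ≤ r < rows and 0 ≤ c < cols, so the `.toNat`/`getD` total forms below are exact there.
def mget {α : Type} (d : α) (m : List (List α)) (r c : Int) : α :=
  (m.getD r.toNat []).getD c.toNat d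

def mset {α : Type} (m : List (List α)) (r c : Int) (x : α) : List (List α) :=
  m.set r.toNat ((m.getD r.toNat []).set c.toNat x)

def gv (g : List (List Int)) (r c : Int) : Int := mget 0 g r c

def vg (v : List (List Bool)) (r c : Int) : Bool := mget false v r c

-- the row-major cell order of the nested `for r in range(rows): for c in range(cols)` loops
def positionsOf (rows cols : Nat) : List (Int × Int) :=
  (PySem.List.pyRange 0 rows 1).flatMap
    (fun r => (PySem.List.pyRange 0 cols 1).map (fun c => (r, c)))

-- A's `obj[cr][cc] = grid[cr][cc]` loop over a component, starting from a background grid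
def paint (grid : List (List Int)) (rows cols : Nat) (background : Int)
    (comp : List (Int × Int)) : List (List Int) :=
  comp.foldl (fun out p => mset out p.1 p.2 (gv grid p.1 p.2))
    (List.replicate rows (List.replicate cols background))

-- A's `_flood_fill` while-loop; the list head is the stack top (Python pops from the end).
-- The fuel `4*rows*cols+1` bounds the pop count (each pop discards or marks a new cell and
-- pushes 4), so it is never exhausted; it only makes the recursion structural.
def fillA (grid : List (List Int)) (rows cols color : Int) :
    Nat → List (List Bool) → List (Int × Int) → List (Int × Int) →
    List (List Bool) × List (Int × Int)
  | 0, v, _, comp => (v, comp)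
  | fuel + 1, v, stack, comp =>
    match stack with
    | [] => (v, comp)
    | (cr, cc) :: rest =>
      if cr < 0 ∨ rows ≤ cr ∨ cc < 0 ∨ cols ≤ cc then
        fillA grid rows cols color fuel v rest comp
      else if vg v cr cc then
        fillA grid rows cols color fuel v rest comp
      else if gv grid cr cc ≠ color then
        fillA grid rows cols color fuel v rest comp
      else
        fillA grid rows cols color fuel (mset v cr cc true)
          ((cr, cc - 1) :: (cr, cc + 1) :: (cr - 1, cc) :: (cr + 1, cc) :: rest)
          (comp ++ [(cr, cc)])

-- A's `_size` (the count is a nonnegative Python int)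
def sizeA (rows cols : Nat) (background : Int) (obj : List (List Int)) : Nat :=
  (positionsOf rows cols).countP (fun p => gv obj p.1 p.2 != background)

-- A's `get_objects` scan (the two nested for-loops, flattened to their row-major cell list)
def scanA (grid : List (List Int)) (rows cols : Nat) (background : Int) :
    List (Int × Int) → List (List Bool) → List (List (List Int)) → List (List (List Int))
  | [], _, objs => objs
  | (r, c) :: ps, v, objs =>
    let cell := gv grid r c
    if cell ≠ background ∧ vg v r c = false then
      let res := fillA grid rows cols cell (4 * rows * cols + 1) v [(r, c)] []
      scanA grid rows cols background ps res.1
        (objs ++ [paint grid rows cols background res.2])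
    else
      scanA grid rows cols background ps v objs

def get_largest_object (grid : List (List Int)) (background : Int) : List (List Int) :=
  let rows := grid.length
  let cols := (grid.headD []).length
  let objects := scanA grid rows cols background (positionsOf rows cols)
    (List.replicate rows (List.replicate cols false)) []
  match objects with
  | [] => grid
  | o :: rest =>
    -- Python's max(objects, key=_size): keep the current best on ties (first maximum)
    rest.foldl (fun best x =>
      if sizeA rows cols background best < sizeA rows cols background x then x else best) o

-- ===== PORT B =====
-- B's flood-fill while-loop: the visited structure is a Python set of (r, c) tuples
-- (PySem.Set), the component is accumulated as a cell list
def fillB (grid : List (List Int)) (rows cols color : Int) :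
    Nat → PySem.Set (Int × Int) → List (Int × Int) → List (Int × Int) →
    PySem.Set (Int × Int) × List (Int × Int)
  | 0, s, _, comp => (s, comp)
  | fuel + 1, s, stack, comp =>
    match stack with
    | [] => (s, comp)
    | (cr, cc) :: rest =>
      if 0 ≤ cr ∧ cr < rows ∧ 0 ≤ cc ∧ cc < cols ∧
          (cr, cc) ∉ s ∧ gv grid cr cc = color then
        fillB grid rows cols color fuel (PySem.Set.add s (cr, cc))
          ((cr, cc - 1) :: (cr, cc + 1) :: (cr - 1, cc) :: (cr + 1, cc) :: rest)
          (comp ++ [(cr, cc)])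
      else
        fillB grid rows cols color fuel s rest comp

-- B's scan: collect the components as cell lists
def scanB (grid : List (List Int)) (rows cols : Nat) (background : Int) :
    List (Int × Int) → PySem.Set (Int × Int) → List (List (Int × Int)) →
    List (List (Int × Int))
  | [], _, comps => comps
  | (r, c) :: ps, s, comps =>
    if gv grid r c ≠ background ∧ (r, c) ∉ s then
      let res := fillB grid rows cols (gv grid r c) (4 * rows * cols + 1) s [(r, c)] []
      scanB grid rows cols background ps res.1 (comps ++ [res.2])
    else
      scanB grid rows cols background ps s comps

def get_largest_object_alt (grid : List (List Int)) (background : Int) : List (List Int) :=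
  let rows := grid.length
  let cols := (grid.headD []).length
  match scanB grid rows cols background (positionsOf rows cols) PySem.Set.empty [] with
  | [] => grid
  | b :: rest =>
    -- `for comp in comps[1:]: if len(comp) > len(best): best = comp`
    let best := rest.foldl (fun best comp =>
      if best.length < comp.length then comp else best) b
    let bset := PySem.Set.ofList best
    -- the nested comprehension `[[grid[r][c] if (r, c) in bset else background …]]`
    (PySem.List.pyRange 0 rows 1).map (fun r =>
      (PySem.List.pyRange 0 cols 1).map (fun c =>
        if (r, c) ∈ bset then gv grid r c else background))

-- ===== PRECONDITION & SPEC =====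
-- Pre_ excludes exactly the ragged grids with a row shorter than row 0, on which the Python A
-- (and B) raises IndexError at `grid[r][c]`; on every other input A returns normally.
def Pre_get_largest_object (grid : List (List Int)) (background : Int) : Prop :=
  ∀ row ∈ grid, (grid.headD []).length ≤ row.length

instance (grid : List (List Int)) (background : Int) :
    Decidable (Pre_get_largest_object grid background) := by
  unfold Pre_get_largest_object; infer_instance

def pvWitness_get_largest_object : List (List Int) × Int := ([[1, 0], [0, 2]], 0)

def Spec_get_largest_object (grid : List (List Int)) (background : Int)
    (out : List (List Int)) : Prop := out = get_largest_object_alt grid background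

instance (grid : List (List Int)) (background : Int) (out : List (List Int)) :
    Decidable (Spec_get_largest_object grid background out) := by
  unfold Spec_get_largest_object; infer_instance

-- ===== CLAIM (what is proved, stated in full; the proofs are below) =====
def Claim_equal_get_largest_object : Prop := ∀ (grid : List (List Int)) (background : Int), Dom_get_largest_object grid background → Pre_get_largest_object grid background → Spec_get_largest_object grid background (get_largest_object grid background)

-- ===== LEMMAS AND PROOFS =====

-- proof-side abstraction: the list of components A's scan discovers, in discovery order
def compsRec (grid : List (List Int)) (rows cols : Nat) (background : Int) :
    List (Int × Int) → List (List Bool) → List (List (Int × Int))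
  | [], _ => []
  | (r, c) :: ps, v =>
    let cell := gv grid r c
    if cell ≠ background ∧ vg v r c = false then
      let res := fillA grid rows cols cell (4 * rows * cols + 1) v [(r, c)] []
      res.2 :: compsRec grid rows cols background ps res.1
    else
      compsRec grid rows cols background ps v

def WFm {α : Type} (rows cols : Nat) (m : List (List α)) : Prop :=
  m.length = rows ∧ ∀ row ∈ m, row.length = cols

def InB (rows cols : Nat) (p : Int × Int) : Prop :=
  0 ≤ p.1 ∧ p.1 < (rows : Int) ∧ 0 ≤ p.2 ∧ p.2 < (cols : Int)

theorem scanA_eq (grid : List (List Int)) (rows cols : Nat) (background : Int) :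
    ∀ (ps : List (Int × Int)) (v : List (List Bool)) (objs : List (List (List Int))),
      scanA grid rows cols background ps v objs
        = objs ++ (compsRec grid rows cols background ps v).map
            (paint grid rows cols background) := by
  intro ps
  induction ps with
  | nil => intro v objs; simp [scanA, compsRec]
  | cons p ps ih =>
    intro v objs
    obtain ⟨r, c⟩ := p
    simp only [scanA, compsRec]
    by_cases h : gv grid r c ≠ background ∧ vg v r c = false
    · simp only [if_pos h, ih, List.map_cons, List.append_assoc, List.cons_append,
        List.nil_append]
    · simp only [if_neg h, ih]

theorem getD_mem_of_lt {α : Type} (m : List α) (d : α) (n : Nat) (h : n < m.length) :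
    m.getD n d ∈ m := by
  rw [List.getD_eq_getElem m d h]; exact List.getElem_mem h

theorem WFm_mset {α : Type} {rows cols : Nat} {m : List (List α)} (h : WFm rows cols m)
    (r c : Int) (x : α) : WFm rows cols (mset m r c x) := by
  obtain ⟨hlen, hrow⟩ := h
  by_cases hn : r.toNat < m.length
  · refine ⟨by simpa [mset] using hlen, ?_⟩
    intro row hmem
    rcases List.mem_or_eq_of_mem_set hmem with h' | h'
    · exact hrow _ h'
    · subst h'
      rw [List.length_set]
      exact hrow _ (getD_mem_of_lt m [] r.toNat hn)
  · rw [mset, List.set_eq_of_length_le (by omega)]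
    exact ⟨hlen, hrow⟩

theorem mget_mset {α : Type} (d x : α) {rows cols : Nat} {m : List (List α)}
    (hWF : WFm rows cols m) {r c : Int} (hr : 0 ≤ r) (hrr : r < (rows : Int))
    (hc : 0 ≤ c) (hcc : c < (cols : Int)) {r' c' : Int} (hr' : 0 ≤ r') (hc' : 0 ≤ c') :
    mget d (mset m r c x) r' c' = if r' = r ∧ c' = c then x else mget d m r' c' := by
  obtain ⟨hlen, hrowlen⟩ := hWF
  have hi : r.toNat < m.length := by omega
  have hrowl : (m.getD r.toNat []).length = cols :=
    hrowlen _ (getD_mem_of_lt m [] r.toNat hi)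
  have hj : c.toNat < (m.getD r.toNat []).length := by omega
  by_cases hR : r' = r
  · subst hR
    by_cases hC : c' = c
    · subst hC
      rw [if_pos ⟨rfl, rfl⟩]
      simp only [mget, mset, List.getD_eq_getElem?_getD]
      have hj2 : c'.toNat < (m[r'.toNat]?.getD []).length := by
        simpa [List.getD_eq_getElem?_getD] using hj
      rw [List.getElem?_set_self hi, Option.getD_some, List.getElem?_set_self hj2,
        Option.getD_some]
    · have hj' : c.toNat ≠ c'.toNat := by omega
      rw [if_neg (by tauto)]
      simp only [mget, mset, List.getD_eq_getElem?_getD]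
      rw [List.getElem?_set_self hi, Option.getD_some, List.getElem?_set_ne hj']
  · have hri : r.toNat ≠ r'.toNat := by omega
    rw [if_neg (by tauto)]
    simp only [mget, mset, List.getD_eq_getElem?_getD]
    rw [List.getElem?_set_ne hri]

theorem mget_replicate {α : Type} (d x : α) (rows cols : Nat) {p : Int × Int}
    (h : InB rows cols p) :
    mget d (List.replicate rows (List.replicate cols x)) p.1 p.2 = x := by
  obtain ⟨h1, h2, h3, h4⟩ := h
  have hi : p.1.toNat < rows := by omega
  have hj : p.2.toNat < cols := by omega
  simp [mget, List.getD_eq_getElem?_getD, hi, hj]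

theorem WFm_replicate {α : Type} (rows cols : Nat) (x : α) :
    WFm rows cols (List.replicate rows (List.replicate cols x)) :=
  ⟨by simp, by intro row h; rw [List.eq_of_mem_replicate h]; simp⟩

-- simulation of A's flood fill by B's: visited matrix ↔ seen set, identical component lists
theorem fill_sim (grid : List (List Int)) (rows cols : Nat) (color : Int) :
    ∀ (fuel : Nat) (v : List (List Bool)) (s : PySem.Set (Int × Int))
      (stack comp : List (Int × Int)),
      WFm rows cols v →
      (∀ p : Int × Int, InB rows cols p → vg v p.1 p.2 = decide (p ∈ s)) →
      (fillB grid rows cols color fuel s stack comp).2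
          = (fillA grid rows cols color fuel v stack comp).2 ∧
      WFm rows cols (fillA grid rows cols color fuel v stack comp).1 ∧
      (∀ p : Int × Int, InB rows cols p →
        vg (fillA grid rows cols color fuel v stack comp).1 p.1 p.2
          = decide (p ∈ (fillB grid rows cols color fuel s stack comp).1)) := by
  intro fuel
  induction fuel with
  | zero => intro v s stack comp hWF hinv; exact ⟨rfl, hWF, hinv⟩
  | succ n ih =>
    intro v s stack comp hWF hinv
    rcases stack with _ | ⟨⟨cr, cc⟩, rest⟩
    · exact ⟨rfl, hWF, hinv⟩
    · simp only [fillA, fillB]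
      by_cases h1 : cr < 0 ∨ (rows : Int) ≤ cr ∨ cc < 0 ∨ (cols : Int) ≤ cc
      · have hB : ¬(0 ≤ cr ∧ cr < (rows : Int) ∧ 0 ≤ cc ∧ cc < (cols : Int) ∧
            ((cr, cc) : Int × Int) ∉ s ∧ gv grid cr cc = color) := by
          rintro ⟨a, b, c, d, -, -⟩; omega
        simp only [if_pos h1, if_neg hB]
        exact ih v s rest comp hWF hinv
      · push Not at h1
        obtain ⟨hb1, hb2, hb3, hb4⟩ := h1
        have hIn : InB rows cols (cr, cc) := ⟨hb1, hb2, hb3, hb4⟩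
        have hA1 : ¬(cr < 0 ∨ (rows : Int) ≤ cr ∨ cc < 0 ∨ (cols : Int) ≤ cc) := by omega
        simp only [if_neg hA1]
        by_cases h2 : vg v cr cc
        · have hmem : ((cr, cc) : Int × Int) ∈ s := by
            have h := hinv _ hIn
            rw [h2] at h
            exact of_decide_eq_true h.symm
          have hB : ¬(0 ≤ cr ∧ cr < (rows : Int) ∧ 0 ≤ cc ∧ cc < (cols : Int) ∧
              ((cr, cc) : Int × Int) ∉ s ∧ gv grid cr cc = color) := by
            rintro ⟨-, -, -, -, hns, -⟩; exact hns hmem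
          simp only [if_pos h2, if_neg hB]
          exact ih v s rest comp hWF hinv
        · have hnmem : ((cr, cc) : Int × Int) ∉ s := by
            intro hmem
            have := hinv _ hIn
            simp [hmem] at this
            exact h2 this
          simp only [if_neg h2]
          by_cases h3 : gv grid cr cc ≠ color
          · have hB : ¬(0 ≤ cr ∧ cr < (rows : Int) ∧ 0 ≤ cc ∧ cc < (cols : Int) ∧
                ((cr, cc) : Int × Int) ∉ s ∧ gv grid cr cc = color) := by
              rintro ⟨-, -, -, -, -, hg⟩; exact h3 hg
            simp only [if_pos h3, if_neg hB]
            exact ih v s rest comp hWF hinv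
          · push Not at h3
            simp only [if_neg (show ¬ gv grid cr cc ≠ color by simp [h3]),
              if_pos (show 0 ≤ cr ∧ cr < (rows:Int) ∧ 0 ≤ cc ∧ cc < (cols:Int) ∧
                ((cr, cc) : Int × Int) ∉ s ∧ gv grid cr cc = color from
                ⟨hb1, hb2, hb3, hb4, hnmem, h3⟩)]
            have hWF' : WFm rows cols (mset v cr cc true) := WFm_mset hWF cr cc true
            have hinv' : ∀ p : Int × Int, InB rows cols p →
                vg (mset v cr cc true) p.1 p.2
                  = decide (p ∈ PySem.Set.add s (cr, cc)) := by
              intro p hp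
              show mget false (mset v cr cc true) p.1 p.2 = _
              rw [mget_mset false true hWF hb1 hb2 hb3 hb4 hp.1 hp.2.2.1]
              by_cases hq : p = ((cr, cc) : Int × Int)
              · subst hq
                simp [PySem.Set.mem_add]
              · have hne : ¬(p.1 = cr ∧ p.2 = cc) := by
                  rintro ⟨a, b⟩; exact hq (Prod.ext a b)
                rw [if_neg hne]
                have hd : decide (p ∈ PySem.Set.add s (cr, cc)) = decide (p ∈ s) := by
                  simp [PySem.Set.mem_add, hq]
                rw [hd]
                exact hinv p hp
            exact ih _ _ _ _ hWF' hinv'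

-- B's scan collects exactly the components A's scan discovers, in the same order
theorem scan_sim (grid : List (List Int)) (rows cols : Nat) (background : Int) :
    ∀ (ps : List (Int × Int)) (v : List (List Bool)) (s : PySem.Set (Int × Int))
      (acc : List (List (Int × Int))),
      WFm rows cols v →
      (∀ p : Int × Int, InB rows cols p → vg v p.1 p.2 = decide (p ∈ s)) →
      (∀ p ∈ ps, InB rows cols p) →
      scanB grid rows cols background ps s acc
        = acc ++ compsRec grid rows cols background ps v := by
  intro ps
  induction ps with
  | nil => intro v s acc _ _ _; simp [scanB, compsRec]
  | cons p ps ih =>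
    intro v s acc hWF hinv hps
    obtain ⟨r, c⟩ := p
    have hIn : InB rows cols (r, c) := hps _ (List.mem_cons_self ..)
    have hvs : vg v r c = decide ((r, c) ∈ s) := hinv _ hIn
    simp only [scanB, compsRec]
    by_cases h : gv grid r c ≠ background ∧ vg v r c = false
    · have hB : gv grid r c ≠ background ∧ ((r, c) : Int × Int) ∉ s := by
        refine ⟨h.1, ?_⟩
        have := h.2
        rw [hvs] at this
        simpa using this
      simp only [if_pos h, if_pos hB]
      have hfill := fill_sim grid rows cols (gv grid r c) (4 * rows * cols + 1) v s
        [(r, c)] [] hWF hinv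
      rw [hfill.1, ih _ _ _ hfill.2.1 hfill.2.2
        (fun q hq => hps q (List.mem_cons_of_mem _ hq))]
      simp
    · have hB : ¬(gv grid r c ≠ background ∧ ((r, c) : Int × Int) ∉ s) := by
        rintro ⟨hg, hns⟩
        refine h ⟨hg, ?_⟩
        rw [hvs]
        simpa using hns
      simp only [if_neg h, if_neg hB]
      exact ih _ _ _ hWF hinv (fun q hq => hps q (List.mem_cons_of_mem _ hq))

def GoodComp (grid : List (List Int)) (rows cols : Nat) (background : Int)
    (comp : List (Int × Int)) : Prop :=
  comp.Nodup ∧ ∀ p ∈ comp, InB rows cols p ∧ gv grid p.1 p.2 ≠ background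

theorem fill_inv (grid : List (List Int)) (rows cols : Nat) (color : Int) :
    ∀ (fuel : Nat) (v : List (List Bool)) (stack comp : List (Int × Int)),
      WFm rows cols v → comp.Nodup →
      (∀ p ∈ comp, InB rows cols p ∧ gv grid p.1 p.2 = color ∧ vg v p.1 p.2 = true) →
      WFm rows cols (fillA grid rows cols color fuel v stack comp).1 ∧
      (fillA grid rows cols color fuel v stack comp).2.Nodup ∧
      (∀ p ∈ (fillA grid rows cols color fuel v stack comp).2,
        InB rows cols p ∧ gv grid p.1 p.2 = color ∧
        vg (fillA grid rows cols color fuel v stack comp).1 p.1 p.2 = true) := by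
  intro fuel
  induction fuel with
  | zero => intro v stack comp hWF hnd hinv; exact ⟨hWF, hnd, hinv⟩
  | succ n ih =>
    intro v stack comp hWF hnd hinv
    rcases stack with _ | ⟨⟨cr, cc⟩, rest⟩
    · exact ⟨hWF, hnd, hinv⟩
    · simp only [fillA]
      by_cases h1 : cr < 0 ∨ (rows : Int) ≤ cr ∨ cc < 0 ∨ (cols : Int) ≤ cc
      · rw [if_pos h1]; exact ih v rest comp hWF hnd hinv
      · push Not at h1
        obtain ⟨hb1, hb2, hb3, hb4⟩ := h1
        rw [if_neg (by omega)]
        by_cases h2 : vg v cr cc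
        · rw [if_pos h2]; exact ih v rest comp hWF hnd hinv
        · rw [if_neg h2]
          by_cases h3 : gv grid cr cc ≠ color
          · rw [if_pos h3]; exact ih v rest comp hWF hnd hinv
          · rw [if_neg h3]
            push Not at h3
            have hnotin : ((cr, cc) : Int × Int) ∉ comp := by
              intro hmem
              have := (hinv _ hmem).2.2
              simp only [vg] at this h2
              exact h2 this
            have hnd' : (comp ++ [((cr, cc) : Int × Int)]).Nodup := by
              rw [List.nodup_append]
              refine ⟨hnd, List.nodup_singleton _, ?_⟩
              intro a ha b hb
              obtain rfl : b = (cr, cc) := List.mem_singleton.1 hb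
              exact fun h => hnotin (h ▸ ha)
            have hWF' : WFm rows cols (mset v cr cc true) := WFm_mset hWF cr cc true
            have hinv' : ∀ p ∈ comp ++ [((cr, cc) : Int × Int)],
                InB rows cols p ∧ gv grid p.1 p.2 = color ∧
                vg (mset v cr cc true) p.1 p.2 = true := by
              intro p hp
              rcases List.mem_append.1 hp with hp' | hp'
              · obtain ⟨hIn, hgv, hvg⟩ := hinv p hp'
                refine ⟨hIn, hgv, ?_⟩
                show mget false (mset v cr cc true) p.1 p.2 = true
                rw [mget_mset false true hWF hb1 (by omega) hb3 (by omega)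
                  hIn.1 hIn.2.2.1]
                split_ifs with hq
                · rfl
                · exact hvg
              · simp only [List.mem_singleton] at hp'
                subst hp'
                refine ⟨⟨hb1, by omega, hb3, by omega⟩, h3, ?_⟩
                show mget false (mset v cr cc true) cr cc = true
                rw [mget_mset false true hWF hb1 (by omega) hb3 (by omega) hb1 hb3]
                simp
            exact ih _ _ _ hWF' hnd' hinv'

theorem comps_good (grid : List (List Int)) (rows cols : Nat) (background : Int) :
    ∀ (ps : List (Int × Int)) (v : List (List Bool)), WFm rows cols v →
      ∀ comp ∈ compsRec grid rows cols background ps v,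
        GoodComp grid rows cols background comp := by
  intro ps
  induction ps with
  | nil => intro v _ comp hmem; simp [compsRec] at hmem
  | cons p ps ih =>
    intro v hWF comp hmem
    obtain ⟨r, c⟩ := p
    simp only [compsRec] at hmem
    by_cases h : gv grid r c ≠ background ∧ vg v r c = false
    · rw [if_pos h] at hmem
      have hfill := fill_inv grid rows cols (gv grid r c) (4 * rows * cols + 1) v
        [(r, c)] [] hWF (by simp) (by simp)
      rcases List.mem_cons.1 hmem with h' | h'
      · subst h'
        refine ⟨hfill.2.1, ?_⟩
        intro q hq
        obtain ⟨hIn, hgv, -⟩ := hfill.2.2 q hq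
        exact ⟨hIn, by rw [hgv]; exact h.1⟩
      · exact ih _ hfill.1 comp h'
    · rw [if_neg h] at hmem
      exact ih _ hWF comp hmem

theorem paint_get (grid : List (List Int)) (rows cols : Nat) :
    ∀ (comp : List (Int × Int)) (out : List (List Int)),
      WFm rows cols out → (∀ p ∈ comp, InB rows cols p) →
      ∀ q : Int × Int, InB rows cols q →
        gv (comp.foldl (fun out p => mset out p.1 p.2 (gv grid p.1 p.2)) out) q.1 q.2
          = if q ∈ comp then gv grid q.1 q.2 else gv out q.1 q.2 := by
  intro comp
  induction comp with
  | nil => intro out _ _ q _; simp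
  | cons p comp ih =>
    intro out hWF hin q hq
    have hp := hin p (List.mem_cons_self ..)
    rw [List.foldl_cons, ih (mset out p.1 p.2 (gv grid p.1 p.2)) (WFm_mset hWF p.1 p.2 _)
      (fun x hx => hin x (List.mem_cons_of_mem _ hx)) q hq]
    have hms : gv (mset out p.1 p.2 (gv grid p.1 p.2)) q.1 q.2
        = if q.1 = p.1 ∧ q.2 = p.2 then gv grid p.1 p.2 else gv out q.1 q.2 := by
      show mget 0 (mset out p.1 p.2 (gv grid p.1 p.2)) q.1 q.2 = _
      rw [mget_mset 0 _ hWF hp.1 hp.2.1 hp.2.2.1 hp.2.2.2 hq.1 hq.2.2.1]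
      rfl
    by_cases hqc : q ∈ comp
    · simp [hqc]
    · rw [if_neg hqc, hms]
      by_cases hqp : q = p
      · subst hqp
        simp
      · have hne : ¬(q.1 = p.1 ∧ q.2 = p.2) := by
          rintro ⟨a, b⟩; exact hqp (Prod.ext a b)
        rw [if_neg hne, if_neg (by simp [hqp, hqc])]

theorem mem_positions (rows cols : Nat) (p : Int × Int) :
    p ∈ positionsOf rows cols ↔ InB rows cols p := by
  obtain ⟨r, c⟩ := p
  simp only [positionsOf, List.mem_flatMap, List.mem_map,
    PySem.List.mem_pyRange_one, InB, Prod.mk.injEq]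
  constructor
  · rintro ⟨a, ⟨ha1, ha2⟩, b, ⟨hb1, hb2⟩, rfl, rfl⟩
    exact ⟨ha1, ha2, hb1, hb2⟩
  · rintro ⟨h1, h2, h3, h4⟩
    exact ⟨r, ⟨h1, h2⟩, c, ⟨h3, h4⟩, rfl, rfl⟩

theorem nodup_positions (rows cols : Nat) : (positionsOf rows cols).Nodup := by
  refine List.nodup_flatMap.2 ⟨?_, ?_⟩
  · intro x _
    have h1 : (PySem.List.pyRange 0 (cols : Int) 1).Nodup := PySem.List.nodup_pyRange_one _ _
    exact List.Nodup.map (fun a b h => by simpa using h) h1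
  · have h2 : (PySem.List.pyRange 0 (rows : Int) 1).Nodup := PySem.List.nodup_pyRange_one _ _
    refine h2.imp ?_
    intro a b hab
    intro s hs1 hs2
    simp only [List.mem_map] at hs1 hs2
    obtain ⟨c1, -, rfl⟩ := hs1
    obtain ⟨c2, -, h⟩ := hs2
    exact hab (congrArg Prod.fst h).symm

theorem size_paint (grid : List (List Int)) (rows cols : Nat) (background : Int)
    (comp : List (Int × Int)) (hG : GoodComp grid rows cols background comp) :
    sizeA rows cols background (paint grid rows cols background comp) = comp.length := by
  obtain ⟨hnd, hin⟩ := hG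
  have hbase := WFm_replicate (α := Int) rows cols background
  have hget : ∀ q ∈ positionsOf rows cols,
      (gv (paint grid rows cols background comp) q.1 q.2 != background)
        = decide (q ∈ comp) := by
    intro q hq
    have hq' := (mem_positions rows cols q).1 hq
    rw [paint, paint_get grid rows cols comp _ hbase (fun p hp => (hin p hp).1) q hq']
    by_cases h : q ∈ comp
    · simp [h, (hin q h).2]
    · simp only [if_neg h]
      show (mget 0 _ q.1 q.2 != background) = _
      rw [mget_replicate 0 background rows cols hq']
      simp [h]
  rw [sizeA, List.countP_congr (fun x hx => by rw [hget x hx]), List.countP_eq_length_filter]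
  have hperm : ((positionsOf rows cols).filter (fun q => decide (q ∈ comp))).Perm comp := by
    apply (List.perm_ext_iff_of_nodup ((nodup_positions rows cols).filter _) hnd).2
    intro a
    simp only [List.mem_filter, mem_positions, decide_eq_true_eq]
    exact ⟨fun h => h.2, fun h => ⟨(hin a h).1, h⟩⟩
  exact hperm.length_eq

-- A's max-by-size fold over the painted grids is the paint of B's longest-list fold
theorem fold_max (grid : List (List Int)) (rows cols : Nat) (background : Int) :
    ∀ (cs : List (List (Int × Int))) (b : List (Int × Int)),
      GoodComp grid rows cols background b →
      (∀ c ∈ cs, GoodComp grid rows cols background c) →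
      (cs.map (paint grid rows cols background)).foldl
          (fun best x => if sizeA rows cols background best < sizeA rows cols background x
            then x else best) (paint grid rows cols background b)
        = paint grid rows cols background
            (cs.foldl (fun b c => if b.length < c.length then c else b) b) := by
  intro cs
  induction cs with
  | nil => intro b _ _; rfl
  | cons c cs ih =>
    intro b hb hcs
    have hc := hcs c (List.mem_cons_self ..)
    rw [List.map_cons, List.foldl_cons, List.foldl_cons,
      size_paint grid rows cols background b hb, size_paint grid rows cols background c hc]
    by_cases h : b.length < c.length
    · rw [if_pos h, if_pos h, ih c hc (fun x hx => hcs x (List.mem_cons_of_mem _ hx))]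
    · rw [if_neg h, if_neg h, ih b hb (fun x hx => hcs x (List.mem_cons_of_mem _ hx))]

theorem foldl_choice (cs : List (List (Int × Int))) (b : List (Int × Int)) :
    cs.foldl (fun b c => if b.length < c.length then c else b) b ∈ b :: cs := by
  induction cs generalizing b with
  | nil => simp
  | cons c cs ih =>
    rw [List.foldl_cons]
    by_cases h : b.length < c.length
    · rw [if_pos h]
      rcases List.mem_cons.1 (ih c) with h' | h' <;> simp [h']
    · rw [if_neg h]
      rcases List.mem_cons.1 (ih b) with h' | h' <;> simp [h']

theorem WFm_paint (grid : List (List Int)) (rows cols : Nat) (background : Int)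
    (comp : List (Int × Int)) : WFm rows cols (paint grid rows cols background comp) := by
  rw [paint]
  generalize (List.replicate rows (List.replicate cols background)) = out,
    WFm_replicate (α := Int) rows cols background = h
  induction comp generalizing out with
  | nil => exact h
  | cons p comp ih => exact ih _ (WFm_mset h p.1 p.2 _)

theorem getElem_eq_mget {α : Type} (d : α) (m : List (List α)) (i j : Nat)
    (hi : i < m.length) (hj : j < m[i].length) :
    m[i][j] = mget d m (i : Int) (j : Int) := by
  simp [mget, List.getD_eq_getElem?_getD, List.getElem?_eq_getElem, hi, hj]

-- painting the best component equals B's rendering comprehension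
theorem render_eq_paint (grid : List (List Int)) (rows cols : Nat) (background : Int)
    (comp : List (Int × Int)) (hG : GoodComp grid rows cols background comp) :
    (PySem.List.pyRange 0 rows 1).map (fun r =>
      (PySem.List.pyRange 0 cols 1).map (fun c =>
        if (r, c) ∈ PySem.Set.ofList comp then gv grid r c else background))
      = paint grid rows cols background comp := by
  have hWFp := WFm_paint grid rows cols background comp
  have hlenR : (PySem.List.pyRange (0 : Int) (rows : Int) 1).length = rows := by
    rw [PySem.List.length_pyRange_one]; omega
  apply List.ext_getElem
  · simp [hlenR, hWFp.1]
  · intro i hi1 hi2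
    have hirows : i < rows := by simpa [hlenR] using hi1
    apply List.ext_getElem
    · have hrow : (paint grid rows cols background comp)[i].length = cols :=
        hWFp.2 _ (List.getElem_mem hi2)
      simp [PySem.List.length_pyRange_one, hrow]
    · intro j hj1 hj2
      have hjcols : j < cols := by
        have : ((PySem.List.pyRange (0 : Int) (cols : Int) 1).length) = cols := by
          rw [PySem.List.length_pyRange_one]; omega
        simp only [List.getElem_map] at hj1
        simpa [this] using hj1
      have hIn : InB rows cols ((i : Int), (j : Int)) :=
        ⟨by show (0 : Int) ≤ (i : Int); positivity,
         by show (i : Int) < (rows : Int); exact_mod_cast hirows,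
         by show (0 : Int) ≤ (j : Int); positivity,
         by show (j : Int) < (cols : Int); exact_mod_cast hjcols⟩
      simp only [List.getElem_map, PySem.List.getElem_pyRange_one, zero_add]
      rw [getElem_eq_mget 0 (paint grid rows cols background comp) i j hi2 hj2]
      show _ = gv (paint grid rows cols background comp) (i : Int) (j : Int)
      rw [paint, paint_get grid rows cols comp _ (WFm_replicate rows cols background)
        (fun p hp => (hG.2 p hp).1) _ hIn]
      by_cases h : ((i : Int), (j : Int)) ∈ comp
      · rw [if_pos h, if_pos (by rw [PySem.Set.mem_ofList]; exact h)]
      · rw [if_neg h, if_neg (by rw [PySem.Set.mem_ofList]; exact h)]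
        show _ = mget 0 _ _ _
        rw [mget_replicate 0 background rows cols hIn]

theorem main_lemma (grid : List (List Int)) (background : Int) :
    get_largest_object grid background = get_largest_object_alt grid background := by
  simp only [get_largest_object, get_largest_object_alt]
  have hv0 := WFm_replicate (α := Bool) grid.length (grid.headD []).length false
  rw [scanA_eq, scan_sim grid grid.length (grid.headD []).length background
    (positionsOf grid.length (grid.headD []).length)
    (List.replicate grid.length (List.replicate (grid.headD []).length false))
    PySem.Set.empty [] hv0
    (fun p hp => by
      show mget false _ p.1 p.2 = _
      rw [mget_replicate false false grid.length (grid.headD []).length hp]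
      simp [PySem.Set.empty])
    (fun p hp => (mem_positions _ _ p).1 hp)]
  have hgood := comps_good grid grid.length (grid.headD []).length background
    (positionsOf grid.length (grid.headD []).length)
    (List.replicate grid.length (List.replicate (grid.headD []).length false)) hv0
  cases hcs : compsRec grid grid.length (grid.headD []).length background
      (positionsOf grid.length (grid.headD []).length)
      (List.replicate grid.length (List.replicate (grid.headD []).length false)) with
  | nil => simp
  | cons c cs =>
    rw [hcs] at hgood
    have hc := hgood c (List.mem_cons_self ..)
    have hcs' : ∀ x ∈ cs, GoodComp grid grid.length (grid.headD []).length background x :=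
      fun x hx => hgood x (List.mem_cons_of_mem _ hx)
    simp only [List.map_cons, List.nil_append, List.foldl_cons]
    rw [fold_max grid grid.length (grid.headD []).length background cs c hc hcs']
    have hbest := foldl_choice cs c
    have hbestG : GoodComp grid grid.length (grid.headD []).length background
        (cs.foldl (fun b c => if b.length < c.length then c else b) c) := by
      rcases List.mem_cons.1 hbest with h' | h'
      · rw [h']; exact hc
      · exact hcs' _ h'
    exact (render_eq_paint grid grid.length (grid.headD []).length background _ hbestG).symm

-- ===== VERDICT (by name: the statement is the Claim_ definition above) =====
theorem get_largest_object_spec : Claim_equal_get_largest_object := by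
  intro grid background _ _
  unfold Spec_get_largest_object
  exact main_lemma grid background
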